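-- pv_equiv track=rewrite | github.com/khalid20210/mohassaba | modules/blueprints/owner/routes.py | _default_category_for_activity
-- ===== SOURCE A (Python) =====
-- def _default_category_for_activity(activity_family: str, name: str, description: str) -> str:
--     txt = f"{name} {description}".lower()
--
--     if activity_family in {"retail_food", "wholesale_food"}:
--         if any(k in txt for k in ["قهوة", "coffee", "شاي", "tea", "مشروب", "drink"]):
--             return "مشروبات"
--         if any(k in txt for k in ["حلويات", "حلو", "cake", "chocolate"]):
--             return "حلويات"
--         return "مواد غذائية"
--
--     if activity_family in {"retail_fashion", "wholesale_fashion"}: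
--         if any(k in txt for k in ["حذاء", "shoe", "شنطة", "bag"]):
--             return "اكسسوارات"
--         return "ملابس"
--
--     if activity_family.startswith("wholesale"):
--         return "جملة عامة"
--     return "منتجات عامة"
-- ===== SOURCE B (Python) =====
-- # Different decomposition: parse the family name (prefix + product line) instead of set
-- # membership, then rank every matching keyword in one flat comprehension and take the
-- # first hit (no per-category any() chain).
--
-- _FOOD_KEYWORDS = [
--     ("قهوة", "مشروبات"), ("coffee", "مشروبات"), ("شاي", "مشروبات"),
--     ("tea", "مشروبات"), ("مشروب", "مشروبات"), ("drink", "مشروبات"),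
--     ("حلويات", "حلويات"), ("حلو", "حلويات"), ("cake", "حلويات"),
--     ("chocolate", "حلويات"),
-- ]
-- _FASHION_KEYWORDS = [
--     ("حذاء", "اكسسوارات"), ("shoe", "اكسسوارات"),
--     ("شنطة", "اكسسوارات"), ("bag", "اكسسوارات"),
-- ]
--
--
-- def _product_line(activity_family):
--     if activity_family.startswith("retail_"):
--         return activity_family[7:]
--     if activity_family.startswith("wholesale_"):
--         return activity_family[10:]
--     return None
--
--
-- def _default_category_for_activity(activity_family: str, name: str, description: str) -> str:
--     txt = (name + " " + description).lower()
--     line = _product_line(activity_family)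
--     if line == "food":
--         keywords, fallback = _FOOD_KEYWORDS, "مواد غذائية"
--     elif line == "fashion":
--         keywords, fallback = _FASHION_KEYWORDS, "ملابس"
--     else:
--         return "جملة عامة" if activity_family.startswith("wholesale") else "منتجات عامة"
--     hits = [category for keyword, category in keywords if keyword in txt]
--     return hits[0] if hits else fallback
-- ===== Notes on version B (the rewrite author's own statement) =====
-- stated objective: alternative
-- what changed: B parses the family name into a scope prefix plus product line (startswith + slice) instead of whole-name set membership, and replaces A's per-category any() chain with one flat keyword-to-category list scanned once, returning the first matching keyword's category.
import Mathlib
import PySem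

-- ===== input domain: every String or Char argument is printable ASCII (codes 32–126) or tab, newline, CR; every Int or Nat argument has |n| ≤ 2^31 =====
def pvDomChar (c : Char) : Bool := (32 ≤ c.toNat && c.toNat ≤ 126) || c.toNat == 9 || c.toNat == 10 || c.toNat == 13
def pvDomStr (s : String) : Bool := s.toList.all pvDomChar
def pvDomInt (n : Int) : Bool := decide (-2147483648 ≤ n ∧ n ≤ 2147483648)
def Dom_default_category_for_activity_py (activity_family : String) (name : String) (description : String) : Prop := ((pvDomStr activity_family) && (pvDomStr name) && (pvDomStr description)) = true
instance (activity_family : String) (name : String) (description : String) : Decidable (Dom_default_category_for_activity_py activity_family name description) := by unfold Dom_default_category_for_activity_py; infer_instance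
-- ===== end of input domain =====

-- B re-decomposes A (same cost): it parses the family name into prefix + product line and
-- ranks all matching keywords in one flat pass instead of A's set-membership + per-category any() chain.

-- ===== PORT A =====
def default_category_for_activity_py (activity_family : String) (name : String) (description : String) : String :=
  let txt := PySem.Chars.lower (name.toList ++ [' '] ++ description.toList)
  if activity_family == "retail_food" || activity_family == "wholesale_food" then
    if ["قهوة", "coffee", "شاي", "tea", "مشروب", "drink"].any (fun k => PySem.Chars.isIn k.toList txt) then "مشروبات"
    else if ["حلويات", "حلو", "cake", "chocolate"].any (fun k => PySem.Chars.isIn k.toList txt) then "حلويات"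
    else "مواد غذائية"
  else if activity_family == "retail_fashion" || activity_family == "wholesale_fashion" then
    if ["حذاء", "shoe", "شنطة", "bag"].any (fun k => PySem.Chars.isIn k.toList txt) then "اكسسوارات"
    else "ملابس"
  else if PySem.Str.startswith activity_family "wholesale" then "جملة عامة"
  else "منتجات عامة"

-- ===== PORT B =====
-- B-side helpers (the flat keyword → category tables and the family-name parser of Source B)
def pvFoodKeywords : List (String × String) :=
  [("قهوة", "مشروبات"), ("coffee", "مشروبات"), ("شاي", "مشروبات"),
   ("tea", "مشروبات"), ("مشروب", "مشروبات"), ("drink", "مشروبات"),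
   ("حلويات", "حلويات"), ("حلو", "حلويات"), ("cake", "حلويات"),
   ("chocolate", "حلويات")]

def pvFashionKeywords : List (String × String) :=
  [("حذاء", "اكسسوارات"), ("shoe", "اكسسوارات"),
   ("شنطة", "اكسسوارات"), ("bag", "اكسسوارات")]

def pvProductLine (activity_family : String) : Option String :=
  if PySem.Str.startswith activity_family "retail_" then
    some (PySem.Str.slice activity_family (some 7) none)
  else if PySem.Str.startswith activity_family "wholesale_" then
    some (PySem.Str.slice activity_family (some 10) none)
  else none

def pvFirstHit (keywords : List (String × String)) (fallback : String) (txt : List Char) : String :=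
  let hits := (keywords.filter (fun p => PySem.Chars.isIn p.1.toList txt)).map (fun p => p.2)
  match hits with
  | [] => fallback
  | c :: _ => c

def default_category_for_activity_py_alt (activity_family : String) (name : String) (description : String) : String :=
  let txt := PySem.Chars.lower (name.toList ++ [' '] ++ description.toList)
  let line := pvProductLine activity_family
  if line == some "food" then pvFirstHit pvFoodKeywords "مواد غذائية" txt
  else if line == some "fashion" then pvFirstHit pvFashionKeywords "ملابس" txt
  else if PySem.Str.startswith activity_family "wholesale" then "جملة عامة"
  else "منتجات عامة"

-- ===== PRECONDITION & SPEC =====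
def Spec_default_category_for_activity_py (activity_family : String) (name : String) (description : String) (out : String) : Prop := out = default_category_for_activity_py_alt activity_family name description
instance (activity_family : String) (name : String) (description : String) (out : String) : Decidable (Spec_default_category_for_activity_py activity_family name description out) := by unfold Spec_default_category_for_activity_py; infer_instance

-- ===== CLAIM (what is proved, stated in full; the proofs are below) =====
def Claim_equal_default_category_for_activity_py : Prop := ∀ (activity_family : String) (name : String) (description : String), Dom_default_category_for_activity_py activity_family name description → Spec_default_category_for_activity_py activity_family name description (default_category_for_activity_py activity_family name description)

-- ===== LEMMAS AND PROOFS =====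

-- pvFirstHit over a concatenation whose first block all maps to category c:
-- c if any first-block keyword hits, else the first hit of the rest.
lemma pv_firstHit_split (l1 l2 : List (String × String)) (c fb : String) (txt : List Char)
    (hc : ∀ p ∈ l1, p.2 = c) :
    pvFirstHit (l1 ++ l2) fb txt =
      if l1.any (fun p => PySem.Chars.isIn p.1.toList txt) then c else pvFirstHit l2 fb txt := by
  induction l1 with
  | nil => simp
  | cons a l ih =>
    have hrest := ih (fun p hp => hc p (List.mem_cons_of_mem _ hp))
    cases h : PySem.Chars.isIn a.1.toList txt
    · simp only [List.cons_append, List.any_cons, h, Bool.false_or]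
      rw [← hrest]
      simp [pvFirstHit, h]
    · simp [pvFirstHit, h, hc a (by simp)]

-- B's first hit in the flat food table equals A's two-stage any() chain over the food keywords.
lemma pv_food (txt : List Char) :
    pvFirstHit pvFoodKeywords "مواد غذائية" txt
    = (if (["قهوة", "coffee", "شاي", "tea", "مشروب", "drink"] : List String).any (fun k => PySem.Chars.isIn k.toList txt) then "مشروبات"
       else if (["حلويات", "حلو", "cake", "chocolate"] : List String).any (fun k => PySem.Chars.isIn k.toList txt) then "حلويات"
       else "مواد غذائية") := by
  rw [show pvFoodKeywords =
        ([("قهوة", "مشروبات"), ("coffee", "مشروبات"), ("شاي", "مشروبات"),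
          ("tea", "مشروبات"), ("مشروب", "مشروبات"), ("drink", "مشروبات")] ++
         ([("حلويات", "حلويات"), ("حلو", "حلويات"), ("cake", "حلويات"),
           ("chocolate", "حلويات")] ++ [])) from by simp [pvFoodKeywords],
      pv_firstHit_split _ _ "مشروبات" "مواد غذائية" txt (by decide),
      pv_firstHit_split _ [] "حلويات" "مواد غذائية" txt (by decide)]
  simp [pvFirstHit, List.any_cons]

-- Same for the fashion keywords.
lemma pv_fashion (txt : List Char) :
    pvFirstHit pvFashionKeywords "ملابس" txt
    = (if (["حذاء", "shoe", "شنطة", "bag"] : List String).any (fun k => PySem.Chars.isIn k.toList txt) then "اكسسوارات"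
       else "ملابس") := by
  rw [show pvFashionKeywords =
        ([("حذاء", "اكسسوارات"), ("shoe", "اكسسوارات"),
          ("شنطة", "اكسسوارات"), ("bag", "اكسسوارات")] ++ []) from by simp [pvFashionKeywords],
      pv_firstHit_split _ [] "اكسسوارات" "ملابس" txt (by decide)]
  simp [pvFirstHit, List.any_cons]

-- If af starts with prefix p and its remaining slice is l, then af is p followed by l.
lemma pv_recon (af p l : String) (h : PySem.Str.startswith af p = true)
    (hd : PySem.Str.slice af (some (p.toList.length : Int)) none = l) :
    af.toList = p.toList ++ l.toList := by
  rw [PySem.Str.startswith_eq, PySem.Chars.startswith_iff] at h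
  obtain ⟨t, ht⟩ := h
  have hs : (PySem.Str.slice af (some (p.toList.length : Int)) none).toList = af.toList.drop p.toList.length := by
    rw [PySem.Str.toList_slice, PySem.Chars.slice_eq_listSlice,
      PySem.List.slice_from _ (by positivity), Int.toNat_natCast]
  rw [hd] at hs
  rw [← ht] at hs ⊢
  simp at hs
  simp [hs]

-- pvProductLine yields "food"/"fashion" only on the four literal family names.
lemma pv_line_food (af : String) (h : pvProductLine af = some "food") :
    af = "retail_food" ∨ af = "wholesale_food" := by
  unfold pvProductLine at h
  split_ifs at h with h1 h2 <;> simp at h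
  · exact Or.inl (String.toList_inj.mp (by simpa using pv_recon af "retail_" _ h1 h))
  · exact Or.inr (String.toList_inj.mp (by simpa using pv_recon af "wholesale_" _ h2 h))

lemma pv_line_fashion (af : String) (h : pvProductLine af = some "fashion") :
    af = "retail_fashion" ∨ af = "wholesale_fashion" := by
  unfold pvProductLine at h
  split_ifs at h with h1 h2 <;> simp at h
  · exact Or.inl (String.toList_inj.mp (by simpa using pv_recon af "retail_" _ h1 h))
  · exact Or.inr (String.toList_inj.mp (by simpa using pv_recon af "wholesale_" _ h2 h))

-- ===== VERDICT (by name: the statement is the Claim_ definition above) =====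
theorem default_category_for_activity_py_spec : Claim_equal_default_category_for_activity_py := by
  intro af name description _
  unfold Spec_default_category_for_activity_py
  by_cases hA1 : af = "retail_food"
  · subst hA1
    have hline : pvProductLine "retail_food" = some "food" := by decide
    simp [default_category_for_activity_py, default_category_for_activity_py_alt, hline, pv_food]
  · by_cases hA2 : af = "wholesale_food"
    · subst hA2
      have hline : pvProductLine "wholesale_food" = some "food" := by decide
      simp [default_category_for_activity_py, default_category_for_activity_py_alt, hline, pv_food]
    · by_cases hA3 : af = "retail_fashion"
      · subst hA3
        have hline : pvProductLine "retail_fashion" = some "fashion" := by decide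
        simp [default_category_for_activity_py, default_category_for_activity_py_alt, hline, pv_fashion]
      · by_cases hA4 : af = "wholesale_fashion"
        · subst hA4
          have hline : pvProductLine "wholesale_fashion" = some "fashion" := by decide
          simp [default_category_for_activity_py, default_category_for_activity_py_alt, hline, pv_fashion]
        · have hfood : (pvProductLine af == some "food") = false := by
            rw [beq_eq_false_iff_ne]
            intro h
            rcases pv_line_food af h with h' | h'
            · exact hA1 h'
            · exact hA2 h'
          have hfashion : (pvProductLine af == some "fashion") = false := by
            rw [beq_eq_false_iff_ne]
            intro h
            rcases pv_line_fashion af h with h' | h'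
            · exact hA3 h'
            · exact hA4 h'
          simp only [default_category_for_activity_py, default_category_for_activity_py_alt,
            hfood, hfashion]
          simp [hA1, hA2, hA3, hA4]
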